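-- pv_equiv track=rewrite | github.com/amlalejini/lalejini_checkio_ws | home/moore_neighborhood/moore_neighborhood.py | get_neighbor_cells
-- ===== SOURCE A (Python) =====
-- NEIGHBORS = [(-1, -1), (-1, 0), (-1, 1), (0, -1), (0, 1), (1, -1), (1, 0), (1, 1)]
--
-- def get_neighbor_cells(grid, position):
--     '''
--     Given a grid and a position, this function returns a list of all neighboring cells.
--     '''
--     surroundings = []
--     for n in NEIGHBORS:
--         candidate_loc = (position[0] + n[0], position[1] + n[1])
--         valid_location = (candidate_loc[0] >= 0 and candidate_loc[0] < len(grid)) and (candidate_loc[1] >= 0 and candidate_loc[1] < len(grid[-1]))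
--         if valid_location:
--             surroundings.append(candidate_loc)
--     return surroundings
-- ===== SOURCE B (Python) =====
-- def get_neighbor_cells(grid, position):
--     '''
--     Given a grid and a position, this function returns a list of all neighboring cells.
--     '''
--     r0, c0 = position
--     rows = len(grid)
--     cols = len(grid[-1]) if grid else 0
--     return [(r, c)
--             for r in range(rows)
--             for c in range(cols)
--             if max(abs(r - r0), abs(c - c0)) == 1]
-- ===== Notes on version B (the rewrite author's own statement) =====
-- stated objective: alternative
-- what changed: B scans the whole grid rectangle row-major and selects the cells at Chebyshev distance exactly 1 from the position, instead of A's testing each of the 8 fixed offsets for validity.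
import Mathlib
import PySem

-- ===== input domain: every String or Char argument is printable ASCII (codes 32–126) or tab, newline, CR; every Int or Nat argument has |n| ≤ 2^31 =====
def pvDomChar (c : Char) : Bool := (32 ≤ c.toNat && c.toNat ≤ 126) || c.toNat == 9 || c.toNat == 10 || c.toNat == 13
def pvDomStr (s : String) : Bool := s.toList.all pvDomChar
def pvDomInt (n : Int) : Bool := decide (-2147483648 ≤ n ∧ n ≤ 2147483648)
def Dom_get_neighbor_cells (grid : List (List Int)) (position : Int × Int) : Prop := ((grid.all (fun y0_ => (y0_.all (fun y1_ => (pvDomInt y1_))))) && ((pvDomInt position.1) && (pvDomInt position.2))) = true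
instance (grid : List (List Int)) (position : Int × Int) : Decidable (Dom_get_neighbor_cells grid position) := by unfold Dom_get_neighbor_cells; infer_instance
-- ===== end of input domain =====

-- B selects, in one row-major scan of the whole grid rectangle, the cells at Chebyshev
-- distance exactly 1 from the position, instead of A's testing the 8 fixed offsets
-- (objective: alternative; B is not faster).

-- ===== PORT A =====
-- NEIGHBORS constant
def pvNeighbors : List (Int × Int) := [(-1, -1), (-1, 0), (-1, 1), (0, -1), (0, 1), (1, -1), (1, 0), (1, 1)]

-- len(grid[-1]); Python only evaluates it when the row check succeeded (grid nonempty),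
-- so the total `.getD []` default is never observed by a passing candidate.
def pvLastLen (grid : List (List Int)) : Int := ((PySem.List.pyGet? grid (-1)).getD []).length

def get_neighbor_cells (grid : List (List Int)) (position : Int × Int) : List (Int × Int) :=
  pvNeighbors.foldl (fun surroundings n =>
    let cand := (position.1 + n.1, position.2 + n.2)
    let valid := (decide (0 ≤ cand.1) && decide (cand.1 < (grid.length : Int))) &&
                 (decide (0 ≤ cand.2) && decide (cand.2 < pvLastLen grid))
    if valid then surroundings ++ [cand] else surroundings) []

-- ===== PORT B =====
-- abs(r - r0) on Python ints is ported as Int.natAbs (equal as a value on all ints).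
def get_neighbor_cells_alt (grid : List (List Int)) (position : Int × Int) : List (Int × Int) :=
  let r0 := position.1
  let c0 := position.2
  let rows : Int := grid.length
  let cols : Int := if grid ≠ [] then (((PySem.List.pyGet? grid (-1)).getD []).length : Int) else 0
  (PySem.List.pyRange 0 rows 1).flatMap (fun r =>
    (PySem.List.pyRange 0 cols 1).filterMap (fun c =>
      if max (r - r0).natAbs (c - c0).natAbs = 1 then some (r, c) else none))

-- ===== PRECONDITION & SPEC =====
def Spec_get_neighbor_cells (grid : List (List Int)) (position : Int × Int) (out : List (Int × Int)) : Prop := out = get_neighbor_cells_alt grid position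
instance (grid : List (List Int)) (position : Int × Int) (out : List (Int × Int)) : Decidable (Spec_get_neighbor_cells grid position out) := by unfold Spec_get_neighbor_cells; infer_instance

-- ===== CLAIM (what is proved, stated in full; the proofs are below) =====
def Claim_equal_get_neighbor_cells : Prop := ∀ (grid : List (List Int)) (position : Int × Int), Dom_get_neighbor_cells grid position → Spec_get_neighbor_cells grid position (get_neighbor_cells grid position)

-- ===== LEMMAS AND PROOFS =====

-- A clamped step-1 range is the filtered unclamped range.
theorem pyRange_clamp (L H : Int) : ∀ (n : ℕ) (lo hi : Int), (hi - lo).toNat = n →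
    PySem.List.pyRange (max L lo) (min H hi) 1 =
      (PySem.List.pyRange lo hi 1).filter (fun x => decide (L ≤ x) && decide (x < H)) := by
  intro n
  induction n with
  | zero =>
    intro lo hi h
    have hle : hi ≤ lo := by omega
    rw [PySem.List.pyRange_one_eq_nil hle, PySem.List.pyRange_one_eq_nil (by omega), List.filter_nil]
  | succ k ih =>
    intro lo hi h
    have hlt : lo < hi := by omega
    rw [PySem.List.pyRange_one_cons hlt, List.filter_cons]
    by_cases hL : L ≤ lo
    · by_cases hH : lo < H
      · have h1 : max L lo = lo := by omega
        have h2 : max L (lo + 1) = lo + 1 := by omega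
        have h3 : lo < min H hi := by omega
        have ih' := ih (lo + 1) hi (by omega)
        rw [h2] at ih'
        rw [h1, PySem.List.pyRange_one_cons h3, ih']
        simp [hL, hH]
      · have h1 : min H hi ≤ max L lo := by omega
        have h2 : min H hi ≤ max L (lo + 1) := by omega
        have ih' := ih (lo + 1) hi (by omega)
        rw [PySem.List.pyRange_one_eq_nil h2] at ih'
        rw [PySem.List.pyRange_one_eq_nil h1, ← ih']
        simp [hH]
    · have h1 : max L lo = max L (lo + 1) := by omega
      rw [h1, ih (lo + 1) hi (by omega)]
      simp [hL]

theorem clamp3 (a B : Int) :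
    PySem.List.pyRange (max 0 (a - 1)) (min B (a + 2)) 1 =
      [a - 1, a, a + 1].filter (fun x => decide (0 ≤ x) && decide (x < B)) := by
  have h : PySem.List.pyRange (a - 1) (a + 2) 1 = [a - 1, a, a + 1] := by
    rw [PySem.List.pyRange_one_cons (by omega), PySem.List.pyRange_one_cons (by omega),
        PySem.List.pyRange_one_cons (by omega), PySem.List.pyRange_one_eq_nil (by omega)]
    norm_num
  rw [pyRange_clamp 0 B 3 (a - 1) (a + 2) (by omega), h]

-- an unclamped range filtered to [a-1, a+2) is the clamped range (max/min on the other side).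
theorem range_filter_triple (a B : Int) :
    (PySem.List.pyRange 0 B 1).filter (fun x => decide (a - 1 ≤ x) && decide (x < a + 2)) =
      PySem.List.pyRange (max 0 (a - 1)) (min B (a + 2)) 1 := by
  rw [max_comm, min_comm]
  exact (pyRange_clamp (a - 1) (a + 2) (B - 0).toNat 0 B (by omega)).symm

-- the inner foldl of the clamped form is 'filter then map'.
theorem innerL (r r0 c0 : Int) (cs : List Int) (acc : List (Int × Int)) :
    cs.foldl (fun res c => if (r, c) ≠ (r0, c0) then res ++ [(r, c)] else res) acc
      = acc ++ (cs.filter (fun c => decide ((r, c) ≠ (r0, c0)))).map (fun c => (r, c)) := by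
  induction cs generalizing acc with
  | nil => simp
  | cons a t ih =>
    simp only [List.foldl_cons, List.filter_cons, ih]
    by_cases h : (r, a) ≠ (r0, c0) <;> simp [h]

theorem fm_cons {α β : Type} (p : α → Bool) (f : α → β) (a : α) (t : List α) :
    List.map f (List.filter p (a :: t)) = (if p a then [f a] else []) ++ List.map f (List.filter p t) := by
  by_cases h : p a <;> simp [h]

theorem fl_cons {α β : Type} (q : α → Bool) (g : α → List β) (a : α) (t : List α) :
    List.flatMap g (List.filter q (a :: t)) = (if q a then g a else []) ++ List.flatMap g (List.filter q t) := by
  by_cases h : q a <;> simp [h]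

-- A row other than r0 keeps all its cells under the centre-exclusion filter.
theorem center_filter_ne (r r0 c0 : Int) (h : r ≠ r0) (l : List Int) :
    List.filter (fun c => decide ((r, c) ≠ (r0, c0))) l = l := by
  refine List.filter_eq_self.mpr (fun c _ => ?_)
  simp [Prod.mk.injEq]
  exact Or.inl h

-- a comprehension's 'if p: yield f(c)' as filter-then-map.
theorem filterMap_guard {α β : Type} (p : α → Prop) [DecidablePred p] (f : α → β) (l : List α) :
    l.filterMap (fun c => if p c then some (f c) else none)
      = (l.filter (fun c => decide (p c))).map f := by
  induction l with
  | nil => rfl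
  | cons a t ih => by_cases h : p a <;> simp [h, ih]

theorem flatMap_congr_mem {α β : Type} (l : List α) (g g' : α → List β)
    (h : ∀ x ∈ l, g x = g' x) : l.flatMap g = l.flatMap g' := by
  induction l with
  | nil => rfl
  | cons a t ih =>
    simp only [List.flatMap_cons, h a (by simp), ih (fun x hx => h x (by simp [hx]))]

-- rows whose image is empty can be filtered away before flat-mapping.
theorem flatMap_drop {α β : Type} (p : α → Bool) (g : α → List β) (l : List α)
    (h : ∀ x ∈ l, p x = false → g x = []) : l.flatMap g = (l.filter p).flatMap g := by
  induction l with
  | nil => rfl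
  | cons a t ih =>
    rw [List.flatMap_cons, List.filter_cons]
    by_cases hp : p a
    · simp [hp, List.flatMap_cons, ih (fun x hx hpx => h x (by simp [hx]) hpx)]
    · simp [hp, h a (by simp) (by simp [hp]), ih (fun x hx hpx => h x (by simp [hx]) hpx)]

-- The combinatorial heart: A's filtered offset scan equals the row-major clamped scan.
theorem core' (R C r0 c0 : Int) :
    List.map (fun n : Int × Int => (r0 + n.1, c0 + n.2))
      (List.filter
        (fun n => decide (0 ≤ r0 + n.1) && decide (r0 + n.1 < R) && (decide (0 ≤ c0 + n.2) && decide (c0 + n.2 < C)))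
        pvNeighbors) =
    List.flatMap
      (fun r =>
        List.map (fun c => (r, c))
          (List.filter (fun c => decide ((r, c) ≠ (r0, c0)))
            (List.filter (fun x => decide (0 ≤ x) && decide (x < C)) [c0 - 1, c0, c0 + 1])))
      (List.filter (fun x => decide (0 ≤ x) && decide (x < R)) [r0 - 1, r0, r0 + 1]) := by
  have hr1 : r0 - 1 ≠ r0 := by omega
  have hr2 : r0 + 1 ≠ r0 := by omega
  have hc1 : c0 - 1 ≠ c0 := by omega
  have hc2 : c0 + 1 ≠ c0 := by omega
  have hcC : List.filter (fun c => decide ((r0, c) ≠ (r0, c0)))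
      (List.filter (fun x => decide (0 ≤ x) && decide (x < C)) [c0 - 1, c0, c0 + 1])
      = List.filter (fun x => decide (0 ≤ x) && decide (x < C)) [c0 - 1, c0 + 1] := by
    rw [List.filter_comm]
    simp [hc1, hc2, Prod.mk.injEq]
  simp only [pvNeighbors, fm_cons, fl_cons, List.filter_nil, List.map_nil, List.flatMap_nil,
    List.append_nil, center_filter_ne (r0 - 1) r0 c0 hr1, center_filter_ne (r0 + 1) r0 c0 hr2, hcC,
    show r0 + (-1:ℤ) = r0 - 1 from by ring, show c0 + (-1:ℤ) = c0 - 1 from by ring,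
    show r0 + (0:ℤ) = r0 from by ring, show c0 + (0:ℤ) = c0 from by ring]
  by_cases h1 : 1 ≤ r0 ∧ r0 ≤ R <;>
  by_cases h2 : 0 ≤ r0 ∧ r0 < R <;>
  by_cases h3 : 0 ≤ r0 + 1 ∧ r0 + 1 < R <;>
  simp [h1, h2, h3]

-- Proof-only fold forms of the two ports, abstracted over the bounds.
def pvFoldA (R C r0 c0 : Int) : List (Int × Int) :=
  pvNeighbors.foldl (fun surroundings n =>
    let cand := (r0 + n.1, c0 + n.2)
    let valid := (decide (0 ≤ cand.1) && decide (cand.1 < R)) &&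
                 (decide (0 ≤ cand.2) && decide (cand.2 < C))
    if valid then surroundings ++ [cand] else surroundings) []

def pvFoldB (R C r0 c0 : Int) : List (Int × Int) :=
  (PySem.List.pyRange (max 0 (r0 - 1)) (min R (r0 + 2)) 1).foldl (fun result r =>
    (PySem.List.pyRange (max 0 (c0 - 1)) (min C (c0 + 2)) 1).foldl (fun result c =>
      if (r, c) ≠ (r0, c0) then result ++ [(r, c)] else result) result) []

def pvScanB (R C r0 c0 : Int) : List (Int × Int) :=
  (PySem.List.pyRange 0 R 1).flatMap (fun r =>
    (PySem.List.pyRange 0 C 1).filterMap (fun c =>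
      if max (r - r0).natAbs (c - c0).natAbs = 1 then some (r, c) else none))

theorem core (R C r0 c0 : Int) : pvFoldA R C r0 c0 = pvFoldB R C r0 c0 := by
  unfold pvFoldA pvFoldB
  rw [clamp3 r0 R, clamp3 c0 C]
  have hA := PySem.List.foldl_append_if
    (l := pvNeighbors)
    (p := fun n : Int × Int => (decide (0 ≤ r0 + n.1) && decide (r0 + n.1 < R)) && (decide (0 ≤ c0 + n.2) && decide (c0 + n.2 < C)))
    (f := fun n : Int × Int => (r0 + n.1, c0 + n.2)) (acc := [])
  simp only [List.nil_append] at hA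
  refine hA.trans ?_
  simp only [innerL]
  rw [PySem.List.foldl_append_eq_flatMap
    (g := fun r => (([c0 - 1, c0, c0 + 1].filter (fun x => decide (0 ≤ x) && decide (x < C))).filter
        (fun c => decide ((r, c) ≠ (r0, c0)))).map (fun c => (r, c)))]
  simp only [List.nil_append]
  exact core' R C r0 c0

-- B's full-rectangle Chebyshev scan equals the clamped fold.
theorem scanB (R C r0 c0 : Int) : pvScanB R C r0 c0 = pvFoldB R C r0 c0 := by
  have hB : pvFoldB R C r0 c0 =
      (PySem.List.pyRange (max 0 (r0 - 1)) (min R (r0 + 2)) 1).flatMap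
        (fun r => ((PySem.List.pyRange (max 0 (c0 - 1)) (min C (c0 + 2)) 1).filter
            (fun c => decide ((r, c) ≠ (r0, c0)))).map (fun c => (r, c))) := by
    unfold pvFoldB
    simp only [innerL]
    rw [PySem.List.foldl_append_eq_flatMap
      (g := fun r => ((PySem.List.pyRange (max 0 (c0 - 1)) (min C (c0 + 2)) 1).filter
          (fun c => decide ((r, c) ≠ (r0, c0)))).map (fun c => (r, c)))]
    simp only [List.nil_append]
  rw [hB]
  unfold pvScanB
  simp only [filterMap_guard]
  have hdrop : ∀ r ∈ PySem.List.pyRange 0 R 1,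
      (decide (r0 - 1 ≤ r) && decide (r < r0 + 2)) = false →
      ((PySem.List.pyRange 0 C 1).filter
          (fun c => decide (max (r - r0).natAbs (c - c0).natAbs = 1))).map (fun c => (r, c)) = [] := by
    intro r _ h
    have hr : r < r0 - 1 ∨ r0 + 2 ≤ r := by
      rcases Bool.and_eq_false_iff.mp h with h1 | h1 <;> simp at h1 <;> omega
    have hempty : (PySem.List.pyRange 0 C 1).filter
        (fun c => decide (max (r - r0).natAbs (c - c0).natAbs = 1)) = [] :=
      List.filter_eq_nil_iff.mpr (fun c _ => by simp; omega)
    rw [hempty]; rfl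
  rw [flatMap_drop _ _ _ hdrop, range_filter_triple r0 R]
  refine flatMap_congr_mem _ _ _ ?_
  intro r hr
  rw [← range_filter_triple r0 R] at hr
  have hrb : r0 - 1 ≤ r ∧ r < r0 + 2 := by
    have := (List.mem_filter.mp hr).2
    simp at this; omega
  congr 1
  rw [← range_filter_triple c0 C, List.filter_filter]
  refine List.filter_congr (fun c _ => ?_)
  have h1 : (decide (r = r0 → ¬c = c0) && (decide (c0 - 1 ≤ c) && decide (c < c0 + 2)))
      = decide ((r = r0 → ¬c = c0) ∧ (c0 - 1 ≤ c ∧ c < c0 + 2)) := by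
    by_cases hA : (r = r0 → ¬c = c0) <;> by_cases hB2 : c0 - 1 ≤ c <;>
      by_cases hC2 : c < c0 + 2 <;> simp [hA, hB2, hC2]
  simp only [ne_eq, Prod.mk.injEq, not_and]
  rw [h1, decide_eq_decide]
  omega

-- ===== VERDICT (by name: the statement is the Claim_ definition above) =====
theorem get_neighbor_cells_spec : Claim_equal_get_neighbor_cells := by
  intro grid position _
  unfold Spec_get_neighbor_cells
  have hA : get_neighbor_cells grid position
      = pvFoldA (grid.length : Int) (pvLastLen grid) position.1 position.2 := rfl
  have hB : get_neighbor_cells_alt grid position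
      = pvScanB (grid.length : Int)
          (if grid ≠ [] then (((PySem.List.pyGet? grid (-1)).getD []).length : Int) else 0)
          position.1 position.2 := rfl
  rw [hA, hB]
  by_cases hg : grid = []
  · subst hg
    have h0 : pvLastLen ([] : List (List Int)) = 0 := rfl
    rw [h0, if_neg (by simp)]
    rw [core, scanB]
  · rw [if_pos hg]
    rw [core, scanB]
    rfl
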